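-- pv_equiv track=rewrite | github.com/aaahunt/DSML | utils/operations.py | merge_and_average_integers
-- ===== SOURCE A (Python) =====
-- def merge_and_average_integers(integers, cluster_range=50):
--       """
--       Merges consecutive integers within a given range and calculates the average of each merged cluster.
--
--       Args:
--             integers (list): A list of integers.
--             cluster_range (int, optional): The maximum range between consecutive integers to be merged. Defaults to 50.
--
--       Returns:
--             list: A list of integers representing the average of each merged cluster.
--       """
--
--       clusters = []
--       current_cluster = [integers[0]]
--
--       for number in integers[1:]:
--             if number - current_cluster[-1] <= cluster_range:
--                   current_cluster.append(number)
--             else: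
--                   clusters.append(current_cluster)
--                   current_cluster = [number]
--
--       if current_cluster:
--             clusters.append(current_cluster)
--
--       return [sum(cluster) // len(cluster) for cluster in clusters]
-- ===== SOURCE B (Python) =====
-- def merge_and_average_integers(integers, cluster_range=50):
--     """Streaming forward pass: keep only a running (sum, count) for the current
--     cluster and emit its floor-average at each cluster break."""
--     if not integers:
--         return []
--     out = []
--     s, cnt = integers[0], 1
--     prev = integers[0]
--     for x in integers[1:]:
--         if x - prev > cluster_range:
--             out.append(s // cnt)
--             s, cnt = 0, 0
--         s += x
--         cnt += 1
--         prev = x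
--     out.append(s // cnt)
--     return out
-- ===== Notes on version B (the rewrite author's own statement) =====
-- stated objective: faster
-- what changed: A materialises explicit cluster lists in a list-of-lists accumulator and averages them in a second comprehension; B is a single streaming pass keeping only a running (sum, count) of the current cluster and emitting each floor-average as the cluster closes. Pre_ excludes only the empty list, on which A raises IndexError indexing the first element.
import Mathlib
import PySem

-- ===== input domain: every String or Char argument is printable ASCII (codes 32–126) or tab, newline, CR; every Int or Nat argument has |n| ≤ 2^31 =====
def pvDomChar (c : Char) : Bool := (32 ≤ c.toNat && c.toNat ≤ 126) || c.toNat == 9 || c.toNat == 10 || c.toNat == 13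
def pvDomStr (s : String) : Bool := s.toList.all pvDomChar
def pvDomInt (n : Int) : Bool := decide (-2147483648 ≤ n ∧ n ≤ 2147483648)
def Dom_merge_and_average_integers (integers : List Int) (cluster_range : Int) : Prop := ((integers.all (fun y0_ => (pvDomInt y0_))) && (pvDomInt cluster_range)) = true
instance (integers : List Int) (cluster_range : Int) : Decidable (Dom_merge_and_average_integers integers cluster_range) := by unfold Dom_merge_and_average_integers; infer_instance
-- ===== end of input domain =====

-- B replaces A's list-of-lists cluster accumulator by a streaming (sum, count) pass (objective: faster, constant factor).

-- ===== PORT A =====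
-- A: left-to-right loop building explicit cluster lists, then averages each.
def pvAStep (cluster_range : Int) (st : List (List Int) × List Int) (number : Int) :
    List (List Int) × List Int :=
  if number - st.2.getLast! ≤ cluster_range then (st.1, st.2 ++ [number])
  else (st.1 ++ [st.2], [number])

def merge_and_average_integers (integers : List Int) (cluster_range : Int) : List Int :=
  match PySem.List.pyGet? integers 0 with
  | none => []  -- Python raises IndexError here (empty list); outside Pre_
  | some x0 =>
    let st := (PySem.List.slice integers (some 1) none).foldl (pvAStep cluster_range) ([], [x0])
    let clusters := if st.2 ≠ [] then st.1 ++ [st.2] else st.1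
    clusters.map (fun cl => PySem.Int.floordiv cl.sum (cl.length : Int))

-- ===== PORT B =====
-- B: streaming pass; state = (emitted averages, running sum, running count, previous element).
def pvBStep (cluster_range : Int) (st : List Int × Int × Int × Int) (x : Int) :
    List Int × Int × Int × Int :=
  let brk :=
    if x - st.2.2.2 > cluster_range then
      (st.1 ++ [PySem.Int.floordiv st.2.1 st.2.2.1], (0 : Int), (0 : Int))
    else (st.1, st.2.1, st.2.2.1)
  (brk.1, brk.2.1 + x, brk.2.2 + 1, x)

def merge_and_average_integers_alt (integers : List Int) (cluster_range : Int) : List Int :=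
  match integers with
  | [] => []
  | x :: xs =>
    let st := xs.foldl (pvBStep cluster_range) ([], x, 1, x)
    st.1 ++ [PySem.Int.floordiv st.2.1 st.2.2.1]

-- ===== PRECONDITION & SPEC =====
-- Pre_ excludes only the empty list, on which Python A raises IndexError indexing the first element.
def Pre_merge_and_average_integers (integers : List Int) (_cluster_range : Int) : Prop :=
  integers ≠ []
instance (integers : List Int) (cluster_range : Int) :
    Decidable (Pre_merge_and_average_integers integers cluster_range) := by
  unfold Pre_merge_and_average_integers; infer_instance

def pvWitness_merge_and_average_integers : List Int × Int := ([1, 30, 200], 50)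

def Spec_merge_and_average_integers (integers : List Int) (cluster_range : Int) (out : List Int) : Prop := out = merge_and_average_integers_alt integers cluster_range
instance (integers : List Int) (cluster_range : Int) (out : List Int) : Decidable (Spec_merge_and_average_integers integers cluster_range out) := by unfold Spec_merge_and_average_integers; infer_instance

-- ===== CLAIM (what is proved, stated in full; the proofs are below) =====
def Claim_equal_merge_and_average_integers : Prop := ∀ (integers : List Int) (cluster_range : Int), Dom_merge_and_average_integers integers cluster_range → Pre_merge_and_average_integers integers cluster_range → Spec_merge_and_average_integers integers cluster_range (merge_and_average_integers integers cluster_range)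


-- ===== LEMMAS AND PROOFS =====

-- Reference shape shared by both proofs: pvSplit c prev xs = (elements of xs
-- joining prev's cluster, the remaining clusters of xs).
def pvSplit (c : Int) (prev : Int) : List Int → List Int × List (List Int)
  | [] => ([], [])
  | y :: r =>
    let p := pvSplit c y r
    if y - prev ≤ c then (y :: p.1, p.2) else ([], (y :: p.1) :: p.2)

def pvAvg (cl : List Int) : Int := PySem.Int.floordiv cl.sum (cl.length : Int)

theorem pv_getLast!_concat (l : List Int) (a : Int) : (l ++ [a]).getLast! = a := by
  induction l with
  | nil => simp [List.getLast!]
  | cons c cs ih => simp [List.getLast!]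

-- A-side: clusters accumulated so far are a passive prefix of the fold state.
theorem pvA_foldl_prefix (c : Int) (l : List Int) (cs : List (List Int)) (cur : List Int) :
    l.foldl (pvAStep c) (cs, cur) =
      (cs ++ (l.foldl (pvAStep c) ([], cur)).1, (l.foldl (pvAStep c) ([], cur)).2) := by
  induction l generalizing cs cur with
  | nil => simp
  | cons y r ih =>
    simp only [List.foldl_cons, pvAStep]
    by_cases h : y - cur.getLast! ≤ c
    · simp only [if_pos h]
      exact ih cs (cur ++ [y])
    · simp only [if_neg h]
      rw [ih (cs ++ [cur]) [y], ih ([] ++ [cur]) [y]]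
      simp

-- A-side: the current cluster is never empty.
theorem pvA_snd_ne (c : Int) (l : List Int) (cs : List (List Int)) (cur : List Int)
    (h : cur ≠ []) : (l.foldl (pvAStep c) (cs, cur)).2 ≠ [] := by
  induction l generalizing cs cur with
  | nil => simpa
  | cons y r ih =>
    simp only [List.foldl_cons, pvAStep]
    by_cases hy : y - cur.getLast! ≤ c
    · simp only [if_pos hy]
      exact ih cs (cur ++ [y]) (by simp)
    · simp only [if_neg hy]
      exact ih (cs ++ [cur]) [y] (by simp)

-- A-side main invariant: A's fold computes cur glued onto pvSplit's clusters.
theorem pvA_run (c : Int) (l : List Int) (cur : List Int) (h : cur ≠ []) :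
    (l.foldl (pvAStep c) ([], cur)).1 ++ [(l.foldl (pvAStep c) ([], cur)).2] =
      (cur ++ (pvSplit c cur.getLast! l).1) :: (pvSplit c cur.getLast! l).2 := by
  induction l generalizing cur with
  | nil => simp [pvSplit]
  | cons y r ih =>
    simp only [List.foldl_cons, pvAStep, pvSplit]
    by_cases hy : y - cur.getLast! ≤ c
    · simp only [if_pos hy]
      have h2 := ih (cur ++ [y]) (by simp)
      rw [pv_getLast!_concat] at h2
      simpa [List.append_assoc] using h2
    · simp only [if_neg hy]
      rw [pvA_foldl_prefix]
      have h2 := ih [y] (by simp)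
      have hy1 : ([y] : List Int).getLast! = y := pv_getLast!_concat [] y
      rw [hy1] at h2
      simp [h2]

-- B-side main invariant: the streaming fold plus the final emission equals
-- "extend the running cluster with pvSplit's join part, then the remaining clusters".
theorem pvB_run (c : Int) (l : List Int) (out : List Int) (s cnt prev : Int) :
    ((l.foldl (pvBStep c) (out, s, cnt, prev)).1 ++
      [PySem.Int.floordiv (l.foldl (pvBStep c) (out, s, cnt, prev)).2.1
        (l.foldl (pvBStep c) (out, s, cnt, prev)).2.2.1]) =
      out ++ PySem.Int.floordiv (s + (pvSplit c prev l).1.sum)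
               (cnt + ((pvSplit c prev l).1.length : Int)) ::
             (pvSplit c prev l).2.map pvAvg := by
  induction l generalizing out s cnt prev with
  | nil => simp [pvSplit]
  | cons y r ih =>
    simp only [List.foldl_cons, pvBStep, pvSplit]
    by_cases hy : y - prev ≤ c
    · have hy' : ¬ y - prev > c := by omega
      simp only [if_neg hy', if_pos hy]
      rw [ih]
      have h1 : s + y + (pvSplit c y r).1.sum = s + (y :: (pvSplit c y r).1).sum := by
        simp; ring
      have h2 : cnt + 1 + ((pvSplit c y r).1.length : Int) =
          cnt + ((y :: (pvSplit c y r).1).length : Int) := by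
        simp; ring
      rw [h1, h2]
    · have hy' : y - prev > c := by omega
      simp only [if_pos hy', if_neg hy]
      rw [ih]
      simp only [List.map_cons, pvAvg, List.append_assoc, List.cons_append, List.nil_append,
        List.sum_cons, List.length_cons]
      have h1 : (0 : Int) + y + (pvSplit c y r).1.sum = y + (pvSplit c y r).1.sum := by ring
      have h2 : (0 : Int) + 1 + ((pvSplit c y r).1.length : Int) =
          (((pvSplit c y r).1.length + 1 : Nat) : Int) := by push_cast; ring
      rw [h1, h2]
      simp

-- ===== VERDICT (by name: the statement is the Claim_ definition above) =====
theorem merge_and_average_integers_spec : Claim_equal_merge_and_average_integers := by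
  intro integers c _ hpre
  unfold Spec_merge_and_average_integers
  match integers, hpre with
  | x :: xs, _ =>
    have hA : merge_and_average_integers (x :: xs) c =
        ((x :: (pvSplit c x xs).1) :: (pvSplit c x xs).2).map pvAvg := by
      unfold merge_and_average_integers
      have hget : PySem.List.pyGet? (x :: xs) 0 = some x := by
        simp [PySem.List.pyGet?, PySem.List.pyIdx?]
      rw [hget]
      have hsl : PySem.List.slice (x :: xs) (some 1) none = xs := by
        simpa using PySem.List.slice_from_one (x :: xs)
      simp only [hsl]
      have hx1 : ([x] : List Int).getLast! = x := pv_getLast!_concat [] x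
      have hne := pvA_snd_ne c xs ([] : List (List Int)) [x] (by simp)
      have hrun := pvA_run c xs [x] (by simp)
      rw [hx1] at hrun
      simp only [if_pos hne] at *
      rw [hrun]
      rfl
    have hB : merge_and_average_integers_alt (x :: xs) c =
        ((x :: (pvSplit c x xs).1) :: (pvSplit c x xs).2).map pvAvg := by
      show (xs.foldl (pvBStep c) ([], x, 1, x)).1 ++
        [PySem.Int.floordiv (xs.foldl (pvBStep c) ([], x, 1, x)).2.1
          (xs.foldl (pvBStep c) ([], x, 1, x)).2.2.1] = _
      have hrun := pvB_run c xs ([] : List Int) x 1 x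
      simp only [List.nil_append] at hrun
      rw [hrun]
      simp only [List.map_cons, pvAvg, List.sum_cons, List.length_cons]
      have h1 : x + (pvSplit c x xs).1.sum = (x :: (pvSplit c x xs).1).sum := by simp
      have h2 : (1 : Int) + ((pvSplit c x xs).1.length : Int) =
          (((pvSplit c x xs).1.length + 1 : Nat) : Int) := by push_cast; ring
      rw [h1, h2]
    rw [hA, hB]
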